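-- pv_equiv track=rewrite | github.com/sighingnow/flashinfer | python/tests/test_batch_tree_attn.py | allocate_table_blocks
-- ===== SOURCE A (Python) =====
-- from typing import List, Tuple
--
-- def allocate_table_blocks(
--     context_lens: List[int],
--     query_lens: List[int],
--     page_size: int,
--     compressed: bool = False,
-- ) -> List[List[int]]:
--     start_table, block_table = 0, []
--     for context_len, query_lens_ in zip(context_lens, query_lens):
--         if compressed:
--             num_required_blocks = (context_len + sum(query_lens_) + page_size - 1) // page_size
--             block_table.append(list(range(start_table, start_table + num_required_blocks)))
--             start_table += num_required_blocks
--         else: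
--             for query_len in query_lens_:
--                 num_required_blocks = (context_len + query_len + page_size - 1) // page_size
--                 block_table.append(list(range(start_table, start_table + num_required_blocks)))
--                 start_table += num_required_blocks
--     return block_table
-- ===== SOURCE B (Python) =====
-- from typing import List, Tuple
--
-- def allocate_table_blocks(
--     context_lens: List[int],
--     query_lens: List[int],
--     page_size: int,
--     compressed: bool = False,
-- ) -> List[List[int]]:
--     # per-row block counts, produced lazily in emission order
--     def row_counts():
--         for c, qs in zip(context_lens, query_lens):
--             if compressed:
--                 yield (c + sum(qs) + page_size - 1) // page_size
--             else:
--                 for q in qs: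
--                     yield (c + q + page_size - 1) // page_size
--     ns = list(row_counts())
--     # build the table back-to-front: walk the counts in reverse,
--     # peeling each row off the END of the global block pool.
--     end = sum(ns)
--     rows = []
--     for n in reversed(ns):
--         end -= n
--         rows.append(list(range(end, end + n)))
--     rows.reverse()
--     return rows
-- ===== Notes on version B (the rewrite author's own statement) =====
-- stated objective: alternative
-- what changed: A numbers rows left-to-right with a running start mutated as each range is appended; B first streams the per-row block counts from a generator, then builds the table BACK-TO-FRONT, peeling each row off the end of the global block pool (end -= n) in reversed order and reversing at the end - a different traversal order with no forward running start.
-- outside the precondition, e.g. on allocate_table_blocks([3], [[1]], 0, False): A raises ZeroDivisionError, B raises ZeroDivisionError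
import Mathlib
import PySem

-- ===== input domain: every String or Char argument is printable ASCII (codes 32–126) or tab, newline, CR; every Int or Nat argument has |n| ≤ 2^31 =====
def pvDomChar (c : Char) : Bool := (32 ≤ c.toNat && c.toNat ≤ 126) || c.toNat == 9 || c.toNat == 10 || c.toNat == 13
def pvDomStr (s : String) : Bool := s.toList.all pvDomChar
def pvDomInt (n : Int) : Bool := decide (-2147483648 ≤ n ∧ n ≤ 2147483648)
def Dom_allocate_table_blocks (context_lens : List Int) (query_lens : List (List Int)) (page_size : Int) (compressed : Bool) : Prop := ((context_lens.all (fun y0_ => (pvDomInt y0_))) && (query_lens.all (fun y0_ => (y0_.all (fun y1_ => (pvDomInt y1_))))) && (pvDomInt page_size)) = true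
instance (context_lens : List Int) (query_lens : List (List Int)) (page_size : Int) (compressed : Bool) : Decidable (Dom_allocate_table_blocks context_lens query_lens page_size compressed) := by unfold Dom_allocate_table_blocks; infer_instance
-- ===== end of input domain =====

-- B builds the table back-to-front: streams per-row counts, then peels each row off the END of the global block pool in reversed order; alternative traversal, same cost.

-- ===== PORT A =====
-- A's single forward pass: running start + growing block_table, inner loop per query_len when not compressed.
def allocate_table_blocks (context_lens : List Int) (query_lens : List (List Int)) (page_size : Int) (compressed : Bool) : List (List Int) :=
  ((context_lens.zip query_lens).foldl
    (fun (st : Int × List (List Int)) p =>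
      if compressed then
        let n := PySem.Int.floordiv (p.1 + p.2.sum + page_size - 1) page_size
        (st.1 + n, st.2 ++ [PySem.List.pyRange st.1 (st.1 + n) 1])
      else
        p.2.foldl
          (fun (st2 : Int × List (List Int)) q =>
            let n := PySem.Int.floordiv (p.1 + q + page_size - 1) page_size
            (st2.1 + n, st2.2 ++ [PySem.List.pyRange st2.1 (st2.1 + n) 1])) st)
    (0, ([] : List (List Int)))).2

-- ===== PORT B =====
-- generator of per-row counts = flatMap over the zipped pairs; then reverse walk subtracting from the end; final reverse.
def allocate_table_blocks_alt (context_lens : List Int) (query_lens : List (List Int)) (page_size : Int) (compressed : Bool) : List (List Int) :=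
  let ns : List Int :=
    (context_lens.zip query_lens).flatMap
      (fun p =>
        if compressed then
          [PySem.Int.floordiv (p.1 + p.2.sum + page_size - 1) page_size]
        else
          p.2.map (fun q => PySem.Int.floordiv (p.1 + q + page_size - 1) page_size))
  (ns.reverse.foldl
    (fun (st : Int × List (List Int)) n =>
      let e := st.1 - n
      (e, st.2 ++ [PySem.List.pyRange e (e + n) 1]))
    (ns.sum, [])).2.reverse

-- ===== PRECONDITION & SPEC =====
-- Pre_ excludes page_size = 0, on which Python A raises ZeroDivisionError as soon as any row is emitted; B raises there too.
def Pre_allocate_table_blocks (context_lens : List Int) (query_lens : List (List Int)) (page_size : Int) (compressed : Bool) : Prop := page_size ≠ 0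
instance (context_lens : List Int) (query_lens : List (List Int)) (page_size : Int) (compressed : Bool) : Decidable (Pre_allocate_table_blocks context_lens query_lens page_size compressed) := by unfold Pre_allocate_table_blocks; infer_instance
def pvWitness_allocate_table_blocks : List Int × List (List Int) × Int × Bool := ([3, 5], [[1, 2], [4]], 2, false)

def Spec_allocate_table_blocks (context_lens : List Int) (query_lens : List (List Int)) (page_size : Int) (compressed : Bool) (out : List (List Int)) : Prop := out = allocate_table_blocks_alt context_lens query_lens page_size compressed
instance (context_lens : List Int) (query_lens : List (List Int)) (page_size : Int) (compressed : Bool) (out : List (List Int)) : Decidable (Spec_allocate_table_blocks context_lens query_lens page_size compressed out) := by unfold Spec_allocate_table_blocks; infer_instance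

-- ===== CLAIM =====
def Claim_equal_allocate_table_blocks : Prop := ∀ (context_lens : List Int) (query_lens : List (List Int)) (page_size : Int) (compressed : Bool), Dom_allocate_table_blocks context_lens query_lens page_size compressed → Pre_allocate_table_blocks context_lens query_lens page_size compressed → Spec_allocate_table_blocks context_lens query_lens page_size compressed (allocate_table_blocks context_lens query_lens page_size compressed)

-- ===== LEMMAS AND PROOFS =====

-- the rows emitted for a list of counts whose first row starts at offset s
def pvRows : List Int → Int → List (List Int)
  | [], _ => []
  | n :: ns, s => PySem.List.pyRange s (s + n) 1 :: pvRows ns (s + n)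

theorem pvRows_append (ns ms : List Int) (s : Int) :
    pvRows (ns ++ ms) s = pvRows ns s ++ pvRows ms (s + ns.sum) := by
  induction ns generalizing s with
  | nil => simp [pvRows]
  | cons n ns ih => simp [pvRows, ih, add_assoc]

-- A's inner loop over one sequence's query lens
theorem pvInner_fold (c ps : Int) (qs : List Int) (s : Int) (out : List (List Int)) :
    (qs.foldl
      (fun (st2 : Int × List (List Int)) q =>
        let n := PySem.Int.floordiv (c + q + ps - 1) ps
        (st2.1 + n, st2.2 ++ [PySem.List.pyRange st2.1 (st2.1 + n) 1])) (s, out))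
      = (s + (qs.map (fun q => PySem.Int.floordiv (c + q + ps - 1) ps)).sum,
         out ++ pvRows (qs.map (fun q => PySem.Int.floordiv (c + q + ps - 1) ps)) s) := by
  induction qs generalizing s out with
  | nil => simp [pvRows]
  | cons q qs ih =>
    simp only [List.foldl_cons]
    rw [ih]
    simp [pvRows, List.append_assoc, add_assoc]

-- A's outer loop characterized by pvRows of the flat count list
theorem pvA_fold (zs : List (Int × List Int)) (ps : Int) (compressed : Bool)
    (s : Int) (out : List (List Int)) :
    (zs.foldl
      (fun (st : Int × List (List Int)) p =>
        if compressed then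
          let n := PySem.Int.floordiv (p.1 + p.2.sum + ps - 1) ps
          (st.1 + n, st.2 ++ [PySem.List.pyRange st.1 (st.1 + n) 1])
        else
          p.2.foldl
            (fun (st2 : Int × List (List Int)) q =>
              let n := PySem.Int.floordiv (p.1 + q + ps - 1) ps
              (st2.1 + n, st2.2 ++ [PySem.List.pyRange st2.1 (st2.1 + n) 1])) st)
      (s, out)).2
      = out ++ pvRows
          (zs.flatMap (fun p =>
            if compressed then
              [PySem.Int.floordiv (p.1 + p.2.sum + ps - 1) ps]
            else
              p.2.map (fun q => PySem.Int.floordiv (p.1 + q + ps - 1) ps))) s := by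
  induction zs generalizing s out with
  | nil => simp [pvRows]
  | cons z zs ih =>
    cases compressed with
    | false =>
      simp only [List.foldl_cons, Bool.false_eq_true, if_false] at ih ⊢
      rw [pvInner_fold, ih]
      simp [List.flatMap_cons, pvRows_append, List.append_assoc]
    | true =>
      simp only [List.foldl_cons, if_true] at ih ⊢
      rw [ih]
      simp [List.flatMap_cons, pvRows, List.append_assoc]

-- B's reverse walk: folding over ns.reverse from end = s + ns.sum yields the rows reversed
theorem pvB_fold (ns : List Int) (s : Int) (acc : List (List Int)) :
    (ns.reverse.foldl
      (fun (st : Int × List (List Int)) n =>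
        let e := st.1 - n
        (e, st.2 ++ [PySem.List.pyRange e (e + n) 1]))
      (s + ns.sum, acc))
      = (s, acc ++ (pvRows ns s).reverse) := by
  induction ns generalizing s acc with
  | nil => simp [pvRows]
  | cons n ns ih =>
    rw [List.reverse_cons, List.foldl_append]
    have h : s + (n :: ns).sum = (s + n) + ns.sum := by simp [add_assoc]
    rw [h, ih]
    simp [pvRows, List.append_assoc, add_sub_cancel_right]

-- ===== VERDICT =====
theorem allocate_table_blocks_spec : Claim_equal_allocate_table_blocks := by
  intro cl ql ps compressed _ _
  show allocate_table_blocks cl ql ps compressed = allocate_table_blocks_alt cl ql ps compressed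
  unfold allocate_table_blocks allocate_table_blocks_alt
  simp only []
  rw [pvA_fold]
  have := pvB_fold
    ((cl.zip ql).flatMap (fun p =>
      if compressed then
        [PySem.Int.floordiv (p.1 + p.2.sum + ps - 1) ps]
      else
        p.2.map (fun q => PySem.Int.floordiv (p.1 + q + ps - 1) ps))) 0 []
  simp only [zero_add] at this
  rw [this]
  simp
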